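-- pv_equiv track=rewrite | github.com/jazzm0/AoC2024 | day_14.py | count_symmetric
-- ===== SOURCE A (Python) =====
-- def count_symmetric(positions, width, height):
--     count_symmetry = 0
--     positions = set(positions)
--     for y in range(height):
--         for x in range(width):
--             if (y, x) in positions and (y, width - x) in positions:
--                 count_symmetry += 1
--     return count_symmetry
-- ===== SOURCE B (Python) =====
-- def count_symmetric(positions, width, height):
--     pos = set(positions)
--     count = 0
--     for (y, x) in pos:
--         if 0 <= y < height and 0 <= x < width and (y, width - x) in pos:
--             count += 1
--     return count
-- ===== Notes on version B (the rewrite author's own statement) =====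
-- stated objective: faster
-- what changed: Replaces the nested scan over every grid cell (range(height) x range(width)) with a single pass over the distinct occupied positions, bounds-guarding each and testing its horizontal mirror in the set.
import Mathlib
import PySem

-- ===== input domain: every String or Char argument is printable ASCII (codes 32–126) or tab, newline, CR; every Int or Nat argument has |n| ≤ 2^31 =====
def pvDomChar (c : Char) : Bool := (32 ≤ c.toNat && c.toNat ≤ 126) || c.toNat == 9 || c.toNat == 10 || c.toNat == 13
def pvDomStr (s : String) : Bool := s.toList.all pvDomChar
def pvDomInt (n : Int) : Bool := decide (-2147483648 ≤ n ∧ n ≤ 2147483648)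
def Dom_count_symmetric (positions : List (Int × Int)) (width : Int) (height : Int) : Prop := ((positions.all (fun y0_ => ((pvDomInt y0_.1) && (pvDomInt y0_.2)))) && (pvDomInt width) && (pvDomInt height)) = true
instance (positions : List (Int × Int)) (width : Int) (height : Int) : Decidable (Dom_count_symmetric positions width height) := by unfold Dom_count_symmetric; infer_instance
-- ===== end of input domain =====

-- B replaces the nested range(height)*range(width) grid scan with one pass over the distinct occupied positions (bounds-guarded), same result.


-- ===== PORT A =====
def count_symmetric (positions : List (Int × Int)) (width : Int) (height : Int) : Int :=
  let pos : PySem.Set (Int × Int) := PySem.Set.ofList positions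
  (PySem.List.pyRange 0 height).foldl (fun count_symmetry y =>
    (PySem.List.pyRange 0 width).foldl (fun count_symmetry x =>
      if PySem.Set.contains pos (y, x) && PySem.Set.contains pos (y, width - x) then
        count_symmetry + 1
      else count_symmetry) count_symmetry) 0

-- ===== PORT B =====
def count_symmetric_alt (positions : List (Int × Int)) (width : Int) (height : Int) : Int :=
  let pos : PySem.Set (Int × Int) := PySem.Set.ofList positions
  pos.foldl (fun count p =>
    if 0 ≤ p.1 && p.1 < height && 0 ≤ p.2 && p.2 < width && PySem.Set.contains pos (p.1, width - p.2) then
      count + 1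
    else count) 0

-- ===== PRECONDITION & SPEC =====
def Spec_count_symmetric (positions : List (Int × Int)) (width : Int) (height : Int) (out : Int) : Prop := out = count_symmetric_alt positions width height
instance (positions : List (Int × Int)) (width : Int) (height : Int) (out : Int) : Decidable (Spec_count_symmetric positions width height out) := by unfold Spec_count_symmetric; infer_instance

-- ===== CLAIM (what is proved, stated in full; the proofs are below) =====
def Claim_equal_count_symmetric : Prop := ∀ (positions : List (Int × Int)) (width : Int) (height : Int), Dom_count_symmetric positions width height → Spec_count_symmetric positions width height (count_symmetric positions width height)

-- ===== LEMMAS AND PROOFS =====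

-- sum over the outer list of inner countP's = countP over the cartesian product list
lemma countP_product_sum (ys xs : List Int) (p : Int → Int → Bool) :
    (ys.map (fun y => xs.countP (fun x => p y x))).sum = (ys ×ˢ xs).countP (fun q => p q.1 q.2) := by
  induction ys with
  | nil => simp
  | cons y ys ih =>
    rw [List.product_cons, List.countP_append, List.countP_map, ← ih]
    simp [Function.comp_def]

lemma sum_map_cast (l : List Int) (f : Int → Nat) :
    (l.map (fun y => ((f y : Nat) : Int))).sum = (((l.map f).sum : Nat) : Int) := by
  induction l with
  | nil => simp
  | cons a l ih => simp [ih]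

theorem count_symmetric_spec : Claim_equal_count_symmetric := by
  intro positions width height _
  unfold Spec_count_symmetric count_symmetric count_symmetric_alt
  simp only [PySem.List.foldl_if_add_one, PySem.List.foldl_add, zero_add]
  set pos : PySem.Set (Int × Int) := PySem.Set.ofList positions with hpos
  rw [sum_map_cast, Nat.cast_inj,
    countP_product_sum (PySem.List.pyRange 0 height) (PySem.List.pyRange 0 width)
      (fun a b => pos.contains (a, b) && pos.contains (a, width - b))]
  rw [List.countP_eq_length_filter, List.countP_eq_length_filter]
  apply List.Perm.length_eq
  rw [List.perm_ext_iff_of_nodup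
    (List.Nodup.filter _ (List.Nodup.product (PySem.List.nodup_pyRange_one 0 height) (PySem.List.nodup_pyRange_one 0 width)))
    (List.Nodup.filter _ (PySem.Set.nodup_ofList positions))]
  rintro ⟨a, b⟩
  have hmem : (a, b) ∈ PySem.List.pyRange 0 height ×ˢ PySem.List.pyRange 0 width ↔
      (0 ≤ a ∧ a < height) ∧ (0 ≤ b ∧ b < width) := by
    rw [show PySem.List.pyRange 0 height ×ˢ PySem.List.pyRange 0 width
        = (PySem.List.pyRange 0 height).product (PySem.List.pyRange 0 width) from rfl,
      List.pair_mem_product]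
    simp [PySem.List.mem_pyRange_one]
  simp only [List.mem_filter, Bool.and_eq_true, decide_eq_true_eq, PySem.Set.contains_iff, ← hpos, hmem]
  tauto
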